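-- pv_equiv track=rewrite | github.com/Thomas-Rammos/- | krwsky.py | calculate_demand_schedule_and_delay
-- ===== SOURCE A (Python) =====
-- from collections import defaultdict
--
-- def node_busy_intervals(start_times, edges_info):
--     """
--     Υπολογίζει τα busy intervals για κάθε κόμβο.
--     busy[node] = [(start, end), ...]
--     """
--     busy = defaultdict(list)
--     for e_id, s_time in start_times.items():
--         n1, n2, w = edges_info[e_id]
--         busy[n1].append((s_time, s_time + w))
--         busy[n2].append((s_time, s_time + w))
--     for node in busy:
--         busy[node].sort(key=lambda x: x[0])
--     return busy
--
-- def find_availability_intervals(busy_intervals, end_time):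
--     """
--     Εύρεση διαστημάτων διαθεσιμότητας ενός κόμβου μέχρι end_time.
--     """
--     available = []
--     current_start = 0
--     for (b_start, b_end) in busy_intervals:
--         if b_start >= end_time:
--             break
--         if b_start > current_start:
--             free_end = min(b_start, end_time)
--             if free_end > current_start:
--                 available.append((current_start, free_end))
--         current_start = max(current_start, b_end)
--         if current_start >= end_time:
--             break
--     if current_start < end_time:
--         available.append((current_start, end_time))
--     return available
--
-- def intersect_intervals(intervals_a, intervals_b):
--     """
--     Τέμνει δύο λίστες διαστημάτων, επιστρέφοντας τα κοινά διαθέσιμα διαστήματα.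
--     """
--     i, j = 0, 0
--     result = []
--     while i < len(intervals_a) and j < len(intervals_b):
--         a_start, a_end = intervals_a[i]
--         b_start, b_end = intervals_b[j]
--         start_int = max(a_start, b_start)
--         end_int = min(a_end, b_end)
--         if start_int < end_int:
--             result.append((start_int, end_int))
--
--         if a_end < b_end:
--             i += 1
--         else:
--             j += 1
--     return result
--
-- def calculate_delays(edges, start_times, edges_info):
--     """
--     Υπολογίζει delay για κάθε ακμή.
--     """
--     busy = node_busy_intervals(start_times, edges_info)
--     delays = {}
--     for (e_id, u, v, w) in edges:
--         s_e = start_times[e_id]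
--         if s_e == 0:
--             delays[e_id] = 0
--             continue
--
--         u_available = find_availability_intervals(busy[u], s_e)
--         v_available = find_availability_intervals(busy[v], s_e)
--         common_available = intersect_intervals(u_available, v_available)
--
--         delay = 0
--         for (st, en) in common_available:
--             end_int = min(en, s_e)
--             if end_int > st:
--                 delay += (end_int - st)
--         delays[e_id] = delay
--
--     return delays
--
-- def calculate_demand_schedule_and_delay(edges, start_times, edges_info, binomial):
--     """
--     Αν το γράφημα είναι binomial, θεωρούμε ότι δεν υπάρχουν καθυστερήσεις.
--     """
--     if binomial:
--         delays = {e_id: 0 for (e_id, _, _, _) in edges}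
--         is_demand_schedule = True
--         return is_demand_schedule, delays
--
--     delays = calculate_delays(edges, start_times, edges_info)
--     is_demand_schedule = all(d == 0 for d in delays.values())
--     return is_demand_schedule, delays
-- ===== SOURCE B (Python) =====
-- from collections import defaultdict
--
-- def calculate_demand_schedule_and_delay(edges, start_times, edges_info, binomial):
--     """
--     If the graph is binomial there are no delays. Otherwise the delay of an
--     edge is the amount of time in [0, s_e) during which neither endpoint is
--     busy: instead of complementing each node's busy list and intersecting the
--     two free lists, merge both endpoints' busy intervals (clipped to
--     [0, s_e)) in one sorted sweep and subtract the covered total from s_e.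
--     """
--     if binomial:
--         return True, {e_id: 0 for (e_id, _, _, _) in edges}
--
--     busy = defaultdict(list)
--     for f_id, t in start_times.items():
--         n1, n2, w = edges_info[f_id]
--         busy[n1].append((t, t + w))
--         busy[n2].append((t, t + w))
--
--     delays = {}
--     for (e_id, u, v, w) in edges:
--         s_e = start_times[e_id]
--         if s_e <= 0:
--             delays[e_id] = 0
--             continue
--         covered = 0
--         cur = 0
--         for (s, e) in sorted(busy.get(u, []) + busy.get(v, []), key=lambda p: p[0]):
--             lo = max(s, cur)
--             hi = min(e, s_e)
--             if hi > lo: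
--                 covered += hi - lo
--                 cur = hi
--         delays[e_id] = s_e - covered
--
--     is_demand_schedule = all(d == 0 for d in delays.values())
--     return is_demand_schedule, delays
-- ===== Notes on version B (the rewrite author's own statement) =====
-- stated objective: simpler
-- what changed: Replaces A's per-node complement (free-interval) construction plus two-pointer intersection of the two free lists by a single pass per edge: merge both endpoints' busy intervals in start order, accumulate the total covered length clipped to [0, s_e), and set delay = s_e - covered (De Morgan dual); the per-node pre-sorting step disappears.
-- outside the precondition, e.g. on calculate_demand_schedule_and_delay([(0, 1, 2, 3)], {}, {}, False): A raises KeyError, B raises KeyError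
import Mathlib
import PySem

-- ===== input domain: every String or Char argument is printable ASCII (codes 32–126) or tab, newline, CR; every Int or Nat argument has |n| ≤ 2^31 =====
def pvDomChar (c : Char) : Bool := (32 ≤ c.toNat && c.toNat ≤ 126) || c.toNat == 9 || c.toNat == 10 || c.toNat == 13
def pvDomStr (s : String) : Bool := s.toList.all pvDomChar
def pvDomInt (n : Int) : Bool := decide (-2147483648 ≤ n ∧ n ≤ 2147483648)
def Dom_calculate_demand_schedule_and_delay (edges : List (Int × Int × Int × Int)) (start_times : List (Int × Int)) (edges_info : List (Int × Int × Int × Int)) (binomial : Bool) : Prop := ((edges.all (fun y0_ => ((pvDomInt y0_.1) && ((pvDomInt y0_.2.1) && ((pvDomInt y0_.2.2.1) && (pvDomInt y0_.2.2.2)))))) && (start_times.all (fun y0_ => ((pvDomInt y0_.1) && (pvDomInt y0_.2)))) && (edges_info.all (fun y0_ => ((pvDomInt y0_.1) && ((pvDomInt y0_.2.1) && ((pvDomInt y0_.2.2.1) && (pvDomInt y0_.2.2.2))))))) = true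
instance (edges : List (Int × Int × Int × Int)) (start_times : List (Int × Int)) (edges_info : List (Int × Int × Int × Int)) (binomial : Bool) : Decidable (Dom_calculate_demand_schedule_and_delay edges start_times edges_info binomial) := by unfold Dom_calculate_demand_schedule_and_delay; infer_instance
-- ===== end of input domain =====

-- B replaces A's per-node complement + two-pointer intersection of free lists by one sorted
-- merge of both endpoints' busy intervals, subtracting the covered length from s_e (simpler,
-- same cost); equivalence is claimed for well-formed (non-negative duration) scheduled edges.

-- ===== PORT A =====
-- node_busy_intervals: the appending loop over start_times.items()
def pvA_rawBusy (start_times : List (Int × Int)) (edges_info : List (Int × Int × Int × Int)) : PySem.Dict Int (List (Int × Int)) :=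
  start_times.foldl (fun busy p =>
    let v := (PySem.Dict.mk edges_info).getD p.1 (0, 0, 0)   -- KeyError when absent: excluded by Pre_
    let iv : Int × Int := (p.2, p.2 + v.2.2)
    let busy := busy.insert v.1 ((busy.getD v.1 []) ++ [iv])
    busy.insert v.2.1 ((busy.getD v.2.1 []) ++ [iv])) PySem.Dict.empty

-- node_busy_intervals: the in-place sort of every node's list
def pvA_nodeBusy (start_times : List (Int × Int)) (edges_info : List (Int × Int × Int × Int)) : PySem.Dict Int (List (Int × Int)) :=
  PySem.Dict.mk ((pvA_rawBusy start_times edges_info).items.map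
    (fun kv => (kv.1, PySem.List.sorted kv.2 (fun x => x.1) false)))

-- find_availability_intervals: loop with current_start, both breaks, and the trailing interval
def pvA_availAux : List (Int × Int) → Int → Int → List (Int × Int)
  | [], cur, T => if cur < T then [(cur, T)] else []
  | (s, e) :: rest, cur, T =>
    if T ≤ s then (if cur < T then [(cur, T)] else [])
    else
      let head : List (Int × Int) := if cur < s then (if cur < min s T then [(cur, min s T)] else []) else []
      let cur' := max cur e
      if T ≤ cur' then head
      else head ++ pvA_availAux rest cur' T

def pvA_find_availability (busy : List (Int × Int)) (T : Int) : List (Int × Int) :=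
  pvA_availAux busy 0 T

-- intersect_intervals: the two-pointer loop
def pvA_intersect : List (Int × Int) → List (Int × Int) → List (Int × Int)
  | a :: as_, b :: bs =>
    let s := max a.1 b.1
    let e := min a.2 b.2
    let h : List (Int × Int) := if s < e then [(s, e)] else []
    if a.2 < b.2 then h ++ pvA_intersect as_ (b :: bs) else h ++ pvA_intersect (a :: as_) bs
  | _, _ => []
  termination_by a b => a.length + b.length

-- calculate_delays
def pvA_delays (edges : List (Int × Int × Int × Int)) (start_times : List (Int × Int)) (edges_info : List (Int × Int × Int × Int)) : PySem.Dict Int Int :=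
  let busy := pvA_nodeBusy start_times edges_info
  edges.foldl (fun d e =>
    let s_e := (PySem.Dict.mk start_times).getD e.1 0   -- KeyError when absent: excluded by Pre_
    if s_e = 0 then d.insert e.1 0
    else
      let ua := pvA_find_availability (busy.getD e.2.1 []) s_e
      let va := pvA_find_availability (busy.getD e.2.2.1 []) s_e
      let ca := pvA_intersect ua va
      let delay := ca.foldl (fun acc p => if p.1 < min p.2 s_e then acc + (min p.2 s_e - p.1) else acc) 0
      d.insert e.1 delay) PySem.Dict.empty

def calculate_demand_schedule_and_delay (edges : List (Int × Int × Int × Int)) (start_times : List (Int × Int)) (edges_info : List (Int × Int × Int × Int)) (binomial : Bool) : Bool × (List (Int × Int)) :=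
  if binomial then
    (true, (edges.foldl (fun d e => d.insert e.1 (0 : Int)) (PySem.Dict.empty : PySem.Dict Int Int)).items)
  else
    let delays := pvA_delays edges start_times edges_info
    (delays.values.all (fun d => d == 0), delays.items)

-- ===== PORT B =====
-- the same busy-building loop Source B runs (no per-node sort)
def pvB_rawBusy (start_times : List (Int × Int)) (edges_info : List (Int × Int × Int × Int)) : PySem.Dict Int (List (Int × Int)) :=
  start_times.foldl (fun busy p =>
    let v := (PySem.Dict.mk edges_info).getD p.1 (0, 0, 0)   -- KeyError when absent: excluded by Pre_
    let iv : Int × Int := (p.2, p.2 + v.2.2)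
    let busy := busy.insert v.1 ((busy.getD v.1 []) ++ [iv])
    busy.insert v.2.1 ((busy.getD v.2.1 []) ++ [iv])) PySem.Dict.empty

-- the sorted sweep: state (covered, cur)
def pvB_merge (ivs : List (Int × Int)) (T : Int) : Int × Int :=
  ivs.foldl (fun st p =>
    let lo := max p.1 st.2
    let hi := min p.2 T
    if lo < hi then (st.1 + (hi - lo), hi) else st) (0, 0)

def calculate_demand_schedule_and_delay_alt (edges : List (Int × Int × Int × Int)) (start_times : List (Int × Int)) (edges_info : List (Int × Int × Int × Int)) (binomial : Bool) : Bool × (List (Int × Int)) :=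
  if binomial then
    (true, (edges.foldl (fun d e => d.insert e.1 (0 : Int)) (PySem.Dict.empty : PySem.Dict Int Int)).items)
  else
    let busy := pvB_rawBusy start_times edges_info
    let delays := edges.foldl (fun d e =>
      let s_e := (PySem.Dict.mk start_times).getD e.1 0   -- KeyError when absent: excluded by Pre_
      if s_e ≤ 0 then d.insert e.1 0
      else
        let ivs := PySem.List.sorted ((busy.getD e.2.1 []) ++ (busy.getD e.2.2.1 [])) (fun p => p.1) false
        d.insert e.1 (s_e - (pvB_merge ivs s_e).1)) PySem.Dict.empty
    (delays.values.all (fun d => d == 0), delays.items)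

-- ===== PRECONDITION & SPEC =====
-- Pre_ excludes (i) inputs where A raises KeyError (an edge id missing from start_times, or a
-- scheduled id missing from edges_info), and (ii) malformed inputs in which a scheduled edge has a
-- negative duration: busy intervals with end < start break A's complement/intersection invariants
-- and A then returns accidentally double-counted delays; B's natural sweep measures the true
-- covered time there. Natural domain = non-negative durations for scheduled edges.
def Pre_calculate_demand_schedule_and_delay (edges : List (Int × Int × Int × Int)) (start_times : List (Int × Int)) (edges_info : List (Int × Int × Int × Int)) (binomial : Bool) : Prop :=
  binomial = true ∨
    ((start_times.all (fun p =>
        match (PySem.Dict.mk edges_info).get? p.1 with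
        | some v => decide (0 ≤ v.2.2)
        | none => false)) = true
     ∧ (edges.all (fun e => ((PySem.Dict.mk start_times).get? e.1).isSome)) = true)
instance (edges : List (Int × Int × Int × Int)) (start_times : List (Int × Int)) (edges_info : List (Int × Int × Int × Int)) (binomial : Bool) : Decidable (Pre_calculate_demand_schedule_and_delay edges start_times edges_info binomial) := by unfold Pre_calculate_demand_schedule_and_delay; infer_instance

def pvWitness_calculate_demand_schedule_and_delay : (List (Int × Int × Int × Int)) × (List (Int × Int)) × (List (Int × Int × Int × Int)) × Bool :=
  ([(0, 1, 2, 3)], [(0, 2)], [(0, 1, 2, 3)], false)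

def Spec_calculate_demand_schedule_and_delay (edges : List (Int × Int × Int × Int)) (start_times : List (Int × Int)) (edges_info : List (Int × Int × Int × Int)) (binomial : Bool) (out : Bool × (List (Int × Int))) : Prop := out = calculate_demand_schedule_and_delay_alt edges start_times edges_info binomial
instance (edges : List (Int × Int × Int × Int)) (start_times : List (Int × Int)) (edges_info : List (Int × Int × Int × Int)) (binomial : Bool) (out : Bool × (List (Int × Int))) : Decidable (Spec_calculate_demand_schedule_and_delay edges start_times edges_info binomial out) := by unfold Spec_calculate_demand_schedule_and_delay; infer_instance

-- ===== CLAIM (what is proved, stated in full; the proofs are below) =====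
def Claim_equal_calculate_demand_schedule_and_delay : Prop := ∀ (edges : List (Int × Int × Int × Int)) (start_times : List (Int × Int)) (edges_info : List (Int × Int × Int × Int)) (binomial : Bool), Dom_calculate_demand_schedule_and_delay edges start_times edges_info binomial → Pre_calculate_demand_schedule_and_delay edges start_times edges_info binomial → Spec_calculate_demand_schedule_and_delay edges start_times edges_info binomial (calculate_demand_schedule_and_delay edges start_times edges_info binomial)

-- ===== LEMMAS AND PROOFS =====

-- point coverage of a list of half-open intervals
def pvCov (L : List (Int × Int)) (t : Int) : Bool :=
  L.any (fun p => decide (p.1 ≤ t) && decide (t < p.2))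

theorem pvCov_iff (L : List (Int × Int)) (t : Int) :
    pvCov L t = true ↔ ∃ p ∈ L, p.1 ≤ t ∧ t < p.2 := by
  simp [pvCov]

theorem pvCov_nil (t : Int) : pvCov [] t = false := rfl

theorem pvCov_cons (p : Int × Int) (L : List (Int × Int)) (t : Int) :
    pvCov (p :: L) t = true ↔ (p.1 ≤ t ∧ t < p.2) ∨ pvCov L t = true := by
  simp [pvCov]

theorem pvCov_append (L M : List (Int × Int)) (t : Int) :
    pvCov (L ++ M) t = true ↔ pvCov L t = true ∨ pvCov M t = true := by
  simp [pvCov, List.any_append]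

theorem pvCov_eq_of_mem_iff {L M : List (Int × Int)} (h : ∀ p, p ∈ L ↔ p ∈ M) (t : Int) :
    pvCov L t = pvCov M t := by
  rw [Bool.eq_iff_iff, pvCov_iff, pvCov_iff]
  constructor
  · rintro ⟨p, hp, h1, h2⟩; exact ⟨p, (h p).mp hp, h1, h2⟩
  · rintro ⟨p, hp, h1, h2⟩; exact ⟨p, (h p).mpr hp, h1, h2⟩

-- nothing left of every start is covered
theorem pvCov_lt_start {s : Int} {L : List (Int × Int)} (h : ∀ q ∈ L, s ≤ q.1) {t : Int}
    (ht : t < s) : pvCov L t = false := by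
  rw [← Bool.not_eq_true, pvCov_iff]
  rintro ⟨q, hq, h1, h2⟩
  have := h q hq
  omega

-- number of covered integer points in [a, b)
def pvN (L : List (Int × Int)) (a b : Int) : ℕ :=
  (PySem.List.pyRange a b 1).countP (fun t => pvCov L t)

theorem pvN_congr {L M : List (Int × Int)} {a b : Int}
    (h : ∀ t, a ≤ t → t < b → pvCov L t = pvCov M t) : pvN L a b = pvN M a b := by
  unfold pvN
  refine List.countP_congr (fun t ht => ?_)
  rw [PySem.List.mem_pyRange_one] at ht
  rw [h t ht.1 ht.2]

theorem pvN_nil (a b : Int) : pvN [] a b = 0 := by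
  unfold pvN
  simp [pvCov]

-- complement: points covered by M are exactly those not covered by L
theorem pvN_compl {L M : List (Int × Int)} {a b : Int}
    (h : ∀ t, a ≤ t → t < b → (pvCov M t = true ↔ pvCov L t = false)) :
    pvN M a b + pvN L a b = (b - a).toNat := by
  unfold pvN
  have h1 : (PySem.List.pyRange a b 1).countP (fun t => pvCov M t)
      = (PySem.List.pyRange a b 1).countP (fun t => !(pvCov L t)) := by
    refine List.countP_congr (fun t ht => ?_)
    rw [PySem.List.mem_pyRange_one] at ht
    have := h t ht.1 ht.2
    constructor
    · intro hm; simp [(this.1 hm)]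
    · intro hl; exact this.2 (by simpa using hl)
  rw [h1, Nat.add_comm]
  have hlen : (PySem.List.pyRange a b 1).countP (fun t => pvCov L t)
      + (PySem.List.pyRange a b 1).countP (fun t => !(pvCov L t))
      = (PySem.List.pyRange a b 1).length := by
    induction PySem.List.pyRange a b 1 with
    | nil => simp
    | cons x t ih => by_cases hx : pvCov L x = true <;> simp [hx] <;> omega
  rw [hlen, PySem.List.length_pyRange_one]

-- all points of [a, b) covered: full count
theorem pvN_full {L : List (Int × Int)} {a b : Int}
    (h : ∀ t, a ≤ t → t < b → pvCov L t = true) : pvN L a b = (b - a).toNat := by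
  unfold pvN
  have : (PySem.List.pyRange a b 1).countP (fun t => pvCov L t)
      = (PySem.List.pyRange a b 1).countP (fun _ => true) := by
    refine List.countP_congr (fun t ht => ?_)
    rw [PySem.List.mem_pyRange_one] at ht
    rw [h t ht.1 ht.2]
  rw [this]
  simp [PySem.List.length_pyRange_one]

-- none covered: zero
theorem pvN_zero {L : List (Int × Int)} {a b : Int}
    (h : ∀ t, a ≤ t → t < b → pvCov L t = false) : pvN L a b = 0 := by
  unfold pvN
  rw [List.countP_eq_zero]
  intro t ht
  rw [PySem.List.mem_pyRange_one] at ht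
  simp [h t ht.1 ht.2]

-- split the range at m
theorem pvN_split {L : List (Int × Int)} {a b : Int} (m : Int) (h1 : a ≤ m) (h2 : m ≤ b) :
    pvN L a b = pvN L a m + pvN L m b := by
  unfold pvN
  rw [PySem.List.pyRange_one_append a m b h1 h2, List.countP_append]

-- skipped interval contributes nothing
theorem pvN_cons_skip {s e c T : Int} {rest : List (Int × Int)}
    (h : min e T ≤ max s c) : pvN ((s, e) :: rest) c T = pvN rest c T := by
  refine pvN_congr (fun t h1 h2 => ?_)
  rw [Bool.eq_iff_iff, pvCov_cons]
  constructor
  · rintro (hp | hr)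
    · exact absurd hp (by simp only [not_and]; omega)
    · exact hr
  · exact fun hr => Or.inr hr

-- a taken interval contributes its clipped length, and the lower bound moves to hi
theorem pvN_cons_step {s e c T : Int} {rest : List (Int × Int)}
    (hlt : max s c < min e T) (hrest : ∀ q ∈ rest, s ≤ q.1) :
    pvN ((s, e) :: rest) c T = (min e T - max s c).toNat + pvN rest (min e T) T := by
  have hc : c ≤ min e T := by omega
  have hT : min e T ≤ T := by omega
  rw [pvN_split (L := (s, e) :: rest) (min e T) hc hT]
  congr 1
  · -- on [c, min e T) everything below max s c is uncovered, above it covered by the head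
    have hsplit : pvN ((s, e) :: rest) c (min e T)
        = pvN ((s, e) :: rest) c (max s c) + pvN ((s, e) :: rest) (max s c) (min e T) := by
      exact pvN_split _ (by omega) (by omega)
    rw [hsplit]
    have hz : pvN ((s, e) :: rest) c (max s c) = 0 := by
      refine pvN_zero (fun t h1 h2 => ?_)
      rw [← Bool.not_eq_true, pvCov_cons]
      rintro (hp | hr)
      · omega
      · rw [pvCov_iff] at hr
        obtain ⟨q, hq, hq1, hq2⟩ := hr
        have := hrest q hq
        omega
    have hf : pvN ((s, e) :: rest) (max s c) (min e T) = (min e T - max s c).toNat := by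
      refine pvN_full (fun t h1 h2 => ?_)
      rw [pvCov_cons]
      exact Or.inl ⟨by omega, by omega⟩
    rw [hz, hf]
    omega
  · -- on [min e T, T) the head interval covers nothing new
    refine pvN_congr (fun t h1 h2 => ?_)
    rw [Bool.eq_iff_iff, pvCov_cons]
    constructor
    · rintro (hp | hr)
      · omega
      · exact hr
    · exact fun hr => Or.inr hr

-- ===== A side: availability characterization =====

theorem pvA_availAux_cov (busy : List (Int × Int)) (cur T t : Int)
    (hs : busy.Pairwise (fun p q => p.1 ≤ q.1)) :
    pvCov (pvA_availAux busy cur T) t = true ↔ (cur ≤ t ∧ t < T ∧ pvCov busy t = false) := by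
  induction busy generalizing cur with
  | nil =>
    simp only [pvA_availAux]
    split_ifs with h <;> simp [pvCov_iff, pvCov_nil] <;> omega
  | cons p rest ih =>
    obtain ⟨s, e⟩ := p
    have hstarts : ∀ q ∈ rest, s ≤ q.1 := (List.pairwise_cons.mp hs).1
    have hrest : rest.Pairwise (fun p q => p.1 ≤ q.1) := (List.pairwise_cons.mp hs).2
    simp only [pvA_availAux]
    by_cases h1 : T ≤ s
    · rw [if_pos h1]
      have hcv : t < T → pvCov ((s, e) :: rest) t = false := by
        intro h
        rw [← Bool.not_eq_true, pvCov_cons]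
        rintro (hp | hr)
        · omega
        · rw [pvCov_iff] at hr
          obtain ⟨q, hq, hq1, hq2⟩ := hr
          have := hstarts q hq
          omega
      split_ifs with h2
      · rw [pvCov_iff]
        constructor
        · rintro ⟨q, hq, hq1, hq2⟩
          simp only [List.mem_singleton] at hq
          subst hq
          exact ⟨hq1, hq2, hcv hq2⟩
        · rintro ⟨ha, hb, -⟩
          exact ⟨(cur, T), List.mem_singleton_self _, ha, hb⟩
      · simp only [pvCov_nil, Bool.false_eq_true, false_iff]
        rintro ⟨ha, hb, -⟩
        omega
    · rw [if_neg h1]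
      -- head covers [cur, s) (when nonempty), tail handled by ih at cur' = max cur e
      by_cases h2 : T ≤ max cur e
      · rw [if_pos h2]
        -- result is just the head
        constructor
        · intro hcov
          split_ifs at hcov with hc1 hc2
          · rw [pvCov_iff] at hcov
            obtain ⟨q, hq, hq1, hq2⟩ := hcov
            simp only [List.mem_singleton] at hq
            subst hq
            simp only at hq1 hq2
            refine ⟨hq1, by omega, ?_⟩
            rw [← Bool.not_eq_true, pvCov_cons]
            rintro (hp | hr)
            · omega
            · rw [pvCov_iff] at hr
              obtain ⟨q, hq, hq1', hq2'⟩ := hr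
              have := hstarts q hq
              omega
          · exact absurd hcov (by simp [pvCov_nil])
          · exact absurd hcov (by simp [pvCov_nil])
        · rintro ⟨ha, hb, hc⟩
          rw [← Bool.not_eq_true, pvCov_cons] at hc
          push_neg at hc
          -- t < T ≤ max cur e and cur ≤ t and t not in (s, e): so t < s
          have hts : t < s := by
            rcases hc with ⟨himp, -⟩
            by_contra hge
            have := himp (by simp; omega)
            simp only at this
            omega
          have hcs : cur < s := by omega
          rw [if_pos hcs, if_pos (by omega : cur < min s T), pvCov_iff]
          exact ⟨(cur, min s T), List.mem_singleton_self _, ha, by simp; omega⟩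
      · rw [if_neg h2]
        rw [pvCov_append]
        rw [ih (max cur e) hrest]
        constructor
        · rintro (hh | ⟨ha, hb, hc⟩)
          · split_ifs at hh with hc1 hc2
            · rw [pvCov_iff] at hh
              obtain ⟨q, hq, hq1, hq2⟩ := hh
              simp only [List.mem_singleton] at hq
              subst hq
              simp only at hq1 hq2
              refine ⟨hq1, by omega, ?_⟩
              rw [← Bool.not_eq_true, pvCov_cons]
              rintro (hp | hr)
              · omega
              · rw [pvCov_iff] at hr
                obtain ⟨q, hq, hq1', hq2'⟩ := hr
                have := hstarts q hq
                omega
            · exact absurd hh (by simp [pvCov_nil])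
            · exact absurd hh (by simp [pvCov_nil])
          · refine ⟨by omega, hb, ?_⟩
            rw [← Bool.not_eq_true, pvCov_cons]
            rintro (hp | hr)
            · omega
            · rw [hr] at hc; exact absurd hc (by simp)
        · rintro ⟨ha, hb, hc⟩
          rw [← Bool.not_eq_true, pvCov_cons] at hc
          push_neg at hc
          by_cases hts : t < s
          · left
            have hcs : cur < s := by omega
            rw [if_pos hcs, if_pos (by omega : cur < min s T), pvCov_iff]
            exact ⟨(cur, min s T), List.mem_singleton_self _, ha, by simp; omega⟩
          · right
            push_neg at hts
            have hte := hc.1 (by simpa using hts)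
            simp only at hte
            refine ⟨by omega, hb, ?_⟩
            rw [← Bool.not_eq_true]
            intro hcov
            exact hc.2 hcov

theorem pvA_availAux_canon (busy : List (Int × Int)) (cur T : Int)
    (hs : busy.Pairwise (fun p q => p.1 ≤ q.1)) (hw : ∀ p ∈ busy, p.1 ≤ p.2) :
    (pvA_availAux busy cur T).Pairwise (fun p q => p.2 ≤ q.1) ∧
    ∀ p ∈ pvA_availAux busy cur T, cur ≤ p.1 ∧ p.1 < p.2 ∧ p.2 ≤ T := by
  induction busy generalizing cur with
  | nil =>
    simp only [pvA_availAux]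
    split_ifs with h
    · refine ⟨List.pairwise_singleton _ _, ?_⟩
      intro p hp
      simp only [List.mem_singleton] at hp
      subst hp
      exact ⟨le_refl _, h, le_refl _⟩
    · exact ⟨List.Pairwise.nil, by simp⟩
  | cons q rest ih =>
    obtain ⟨s, e⟩ := q
    have hse : s ≤ e := hw (s, e) (by simp)
    have hrest : rest.Pairwise (fun p q => p.1 ≤ q.1) := (List.pairwise_cons.mp hs).2
    have hwrest : ∀ p ∈ rest, p.1 ≤ p.2 := fun p hp => hw p (List.mem_cons_of_mem _ hp)
    simp only [pvA_availAux]
    by_cases h1 : T ≤ s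
    · rw [if_pos h1]
      split_ifs with h2
      · refine ⟨List.pairwise_singleton _ _, ?_⟩
        intro p hp
        simp only [List.mem_singleton] at hp
        subst hp
        exact ⟨le_refl _, h2, le_refl _⟩
      · exact ⟨List.Pairwise.nil, by simp⟩
    · rw [if_neg h1]
      by_cases h2 : T ≤ max cur e
      · rw [if_pos h2]
        split_ifs with hc1 hc2
        · refine ⟨List.pairwise_singleton _ _, ?_⟩
          intro p hp
          simp only [List.mem_singleton] at hp
          subst hp
          exact ⟨le_refl _, hc2, by omega⟩
        · exact ⟨List.Pairwise.nil, by simp⟩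
        · exact ⟨List.Pairwise.nil, by simp⟩
      · rw [if_neg h2]
        obtain ⟨ihp, ihm⟩ := ih (max cur e) hrest hwrest
        constructor
        · rw [List.pairwise_append]
          refine ⟨?_, ihp, ?_⟩
          · split_ifs with hc1 hc2
            · exact List.pairwise_singleton _ _
            · exact List.Pairwise.nil
            · exact List.Pairwise.nil
          · intro a ha b hb
            have hbm := ihm b hb
            split_ifs at ha with hc1 hc2
            · simp only [List.mem_singleton] at ha
              subst ha
              simp only
              omega
            · simp at ha
            · simp at ha
        · intro p hp
          rw [List.mem_append] at hp
          rcases hp with hp | hp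
          · split_ifs at hp with hc1 hc2
            · simp only [List.mem_singleton] at hp
              subst hp
              exact ⟨le_refl _, hc2, by omega⟩
            · simp at hp
            · simp at hp
          · have := ihm p hp
            exact ⟨by omega, this.2.1, this.2.2⟩

-- ===== A side: intersection characterization =====

theorem pvA_intersect_nil_left (B : List (Int × Int)) : pvA_intersect [] B = [] := by
  rw [pvA_intersect] <;> simp

theorem pvA_intersect_nil_right (A : List (Int × Int)) : pvA_intersect A [] = [] := by
  rw [pvA_intersect] <;> simp

theorem pvA_intersect_cons_cons (a b : Int × Int) (as_ bs : List (Int × Int)) :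
    pvA_intersect (a :: as_) (b :: bs) =
      (if max a.1 b.1 < min a.2 b.2 then [(max a.1 b.1, min a.2 b.2)] else []) ++
        (if a.2 < b.2 then pvA_intersect as_ (b :: bs) else pvA_intersect (a :: as_) bs) := by
  rw [pvA_intersect]
  split_ifs <;> simp

theorem pvA_intersect_canon (A B : List (Int × Int))
    (hA : A.Pairwise (fun p q => p.2 ≤ q.1)) (hB : B.Pairwise (fun p q => p.2 ≤ q.1)) :
    (pvA_intersect A B).Pairwise (fun p q => p.2 ≤ q.1) ∧
    ∀ p ∈ pvA_intersect A B, p.1 < p.2 ∧ (∃ a ∈ A, a.1 ≤ p.1 ∧ p.2 ≤ a.2) ∧ (∃ b ∈ B, b.1 ≤ p.1 ∧ p.2 ≤ b.2) := by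
  have H : ∀ n (A B : List (Int × Int)), A.length + B.length = n →
      A.Pairwise (fun p q => p.2 ≤ q.1) → B.Pairwise (fun p q => p.2 ≤ q.1) →
      ((pvA_intersect A B).Pairwise (fun p q => p.2 ≤ q.1) ∧
       ∀ p ∈ pvA_intersect A B, p.1 < p.2 ∧ (∃ a ∈ A, a.1 ≤ p.1 ∧ p.2 ≤ a.2) ∧ (∃ b ∈ B, b.1 ≤ p.1 ∧ p.2 ≤ b.2)) := by
    intro n
    induction n using Nat.strong_induction_on with
    | _ n ih =>
      intro A B hlen hA hB
      cases A with
      | nil =>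
        rw [pvA_intersect_nil_left]
        exact ⟨List.Pairwise.nil, by simp⟩
      | cons a as_ =>
        cases B with
        | nil =>
          rw [pvA_intersect_nil_right]
          exact ⟨List.Pairwise.nil, by simp⟩
        | cons b bs =>
          rw [pvA_intersect_cons_cons]
          have hAr := (List.pairwise_cons.mp hA).2
          have hAs := (List.pairwise_cons.mp hA).1
          have hBr := (List.pairwise_cons.mp hB).2
          have hBs := (List.pairwise_cons.mp hB).1
          simp only [List.length_cons] at hlen
          by_cases hlt : a.2 < b.2
          · rw [if_pos hlt]
            obtain ⟨rp, rm⟩ := ih (as_.length + (b :: bs).length)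
              (by simp only [List.length_cons]; omega) as_ (b :: bs) rfl hAr hB
            constructor
            · rw [List.pairwise_append]
              refine ⟨by split_ifs; exacts [List.pairwise_singleton _ _, List.Pairwise.nil], rp, ?_⟩
              intro x hx y hy
              obtain ⟨-, ⟨a', ha', ha1, -⟩, -⟩ := rm y hy
              split_ifs at hx
              · simp only [List.mem_singleton] at hx
                subst hx
                have := hAs a' ha'
                simp only
                omega
              · simp at hx
            · intro p hp
              rw [List.mem_append] at hp
              rcases hp with hp | hp
              · split_ifs at hp with hc
                · simp only [List.mem_singleton] at hp
                  subst hp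
                  exact ⟨hc, ⟨a, List.mem_cons_self, by omega, by omega⟩,
                    ⟨b, List.mem_cons_self, by omega, by omega⟩⟩
                · simp at hp
              · obtain ⟨h1, ⟨a', ha', h2⟩, h3⟩ := rm p hp
                exact ⟨h1, ⟨a', List.mem_cons_of_mem _ ha', h2⟩, h3⟩
          · rw [if_neg hlt]
            obtain ⟨rp, rm⟩ := ih ((a :: as_).length + bs.length)
              (by simp only [List.length_cons]; omega) (a :: as_) bs rfl hA hBr
            constructor
            · rw [List.pairwise_append]
              refine ⟨by split_ifs; exacts [List.pairwise_singleton _ _, List.Pairwise.nil], rp, ?_⟩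
              intro x hx y hy
              obtain ⟨-, -, ⟨b', hb', hb1, -⟩⟩ := rm y hy
              split_ifs at hx
              · simp only [List.mem_singleton] at hx
                subst hx
                have := hBs b' hb'
                simp only
                omega
              · simp at hx
            · intro p hp
              rw [List.mem_append] at hp
              rcases hp with hp | hp
              · split_ifs at hp with hc
                · simp only [List.mem_singleton] at hp
                  subst hp
                  exact ⟨hc, ⟨a, List.mem_cons_self, by omega, by omega⟩,
                    ⟨b, List.mem_cons_self, by omega, by omega⟩⟩
                · simp at hp
              · obtain ⟨h1, h2, ⟨b', hb', h3⟩⟩ := rm p hp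
                exact ⟨h1, h2, ⟨b', List.mem_cons_of_mem _ hb', h3⟩⟩
  exact H (A.length + B.length) A B rfl hA hB

theorem pvA_intersect_cov (A B : List (Int × Int)) (t : Int)
    (hA : A.Pairwise (fun p q => p.2 ≤ q.1)) (hB : B.Pairwise (fun p q => p.2 ≤ q.1)) :
    pvCov (pvA_intersect A B) t = true ↔ (pvCov A t = true ∧ pvCov B t = true) := by
  have H : ∀ n (A B : List (Int × Int)), A.length + B.length = n →
      A.Pairwise (fun p q => p.2 ≤ q.1) → B.Pairwise (fun p q => p.2 ≤ q.1) →
      (pvCov (pvA_intersect A B) t = true ↔ (pvCov A t = true ∧ pvCov B t = true)) := by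
    intro n
    induction n using Nat.strong_induction_on with
    | _ n ih =>
      intro A B hlen hA hB
      cases A with
      | nil =>
        rw [pvA_intersect_nil_left]
        simp [pvCov_nil]
      | cons a as_ =>
        cases B with
        | nil =>
          rw [pvA_intersect_nil_right]
          simp [pvCov_nil]
        | cons b bs =>
          rw [pvA_intersect_cons_cons, pvCov_append]
          have hAr := (List.pairwise_cons.mp hA).2
          have hAs := (List.pairwise_cons.mp hA).1
          have hBr := (List.pairwise_cons.mp hB).2
          have hBs := (List.pairwise_cons.mp hB).1
          simp only [List.length_cons] at hlen
          by_cases hlt : a.2 < b.2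
          · rw [if_pos hlt]
            rw [ih (as_.length + (b :: bs).length) (by simp only [List.length_cons]; omega)
              as_ (b :: bs) rfl hAr hB]
            constructor
            · rintro (hh | ⟨h1, h2⟩)
              · split_ifs at hh with hc
                · rw [pvCov_iff] at hh
                  obtain ⟨q, hq, hq1, hq2⟩ := hh
                  simp only [List.mem_singleton] at hq
                  subst hq
                  simp only at hq1 hq2
                  constructor
                  · rw [pvCov_cons]; left; omega
                  · rw [pvCov_cons]; left; omega
                · simp [pvCov_nil] at hh
              · refine ⟨?_, h2⟩
                rw [pvCov_cons]
                right
                exact h1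
            · rintro ⟨h1, h2⟩
              rw [pvCov_cons] at h1
              rcases h1 with h1 | h1
              · -- t is in a; in b :: bs it must be in b (bs starts ≥ b.2 > a.2 > t)
                rw [pvCov_cons] at h2
                rcases h2 with h2 | h2
                · left
                  rw [if_pos (by omega), pvCov_iff]
                  exact ⟨(max a.1 b.1, min a.2 b.2), List.mem_singleton_self _, by omega, by omega⟩
                · rw [pvCov_iff] at h2
                  obtain ⟨q, hq, hq1, hq2⟩ := h2
                  have := hBs q hq
                  omega
              · -- t is in as_: starts after a.2, recurse
                right
                refine ⟨h1, h2⟩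
          · rw [if_neg hlt]
            rw [ih ((a :: as_).length + bs.length) (by simp only [List.length_cons]; omega)
              (a :: as_) bs rfl hA hBr]
            constructor
            · rintro (hh | ⟨h1, h2⟩)
              · split_ifs at hh with hc
                · rw [pvCov_iff] at hh
                  obtain ⟨q, hq, hq1, hq2⟩ := hh
                  simp only [List.mem_singleton] at hq
                  subst hq
                  simp only at hq1 hq2
                  constructor
                  · rw [pvCov_cons]; left; omega
                  · rw [pvCov_cons]; left; omega
                · simp [pvCov_nil] at hh
              · refine ⟨h1, ?_⟩
                rw [pvCov_cons]
                right
                exact h2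
            · rintro ⟨h1, h2⟩
              rw [pvCov_cons] at h2
              rcases h2 with h2 | h2
              · rw [pvCov_cons] at h1
                rcases h1 with h1 | h1
                · left
                  rw [if_pos (by omega), pvCov_iff]
                  exact ⟨(max a.1 b.1, min a.2 b.2), List.mem_singleton_self _, by omega, by omega⟩
                · rw [pvCov_iff] at h1
                  obtain ⟨q, hq, hq1, hq2⟩ := h1
                  have := hAs q hq
                  omega
              · right
                refine ⟨h1, h2⟩
  exact H (A.length + B.length) A B rfl hA hB

-- A's delay fold over a canonical list counts its points
theorem pvA_delay_fold_eq_aux (L : List (Int × Int)) (T acc : Int)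
    (hc : L.Pairwise (fun p q => p.2 ≤ q.1))
    (hb : ∀ p ∈ L, 0 ≤ p.1 ∧ p.1 < p.2 ∧ p.2 ≤ T) :
    L.foldl (fun acc p => if p.1 < min p.2 T then acc + (min p.2 T - p.1) else acc) acc
      = acc + (pvN L 0 T : Int) := by
  induction L generalizing acc with
  | nil => rw [pvN_nil]; simp [List.foldl_nil]
  | cons p rest ih =>
    obtain ⟨hp0, hp12, hpT⟩ := hb p (List.mem_cons_self)
    have hstarts : ∀ q ∈ rest, p.1 ≤ q.1 := by
      intro q hq
      have := (List.pairwise_cons.mp hc).1 q hq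
      omega
    have hrest := (List.pairwise_cons.mp hc).2
    have hbrest : ∀ q ∈ rest, 0 ≤ q.1 ∧ q.1 < q.2 ∧ q.2 ≤ T :=
      fun q hq => hb q (List.mem_cons_of_mem _ hq)
    rw [List.foldl_cons, if_pos (by omega : p.1 < min p.2 T)]
    rw [ih _ hrest hbrest]
    have hstep : pvN (p :: rest) 0 T
        = (min p.2 T - max p.1 0).toNat + pvN rest (min p.2 T) T := by
      have := pvN_cons_step (s := p.1) (e := p.2) (c := 0) (T := T) (rest := rest)
        (by omega) hstarts
      simpa using this
    have hlow : pvN rest 0 T = pvN rest (min p.2 T) T := by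
      rw [pvN_split (L := rest) (min p.2 T) (by omega) (by omega)]
      have : pvN rest 0 (min p.2 T) = 0 := by
        refine pvN_zero (fun t h1 h2 => ?_)
        exact pvCov_lt_start (s := p.2) (List.pairwise_cons.mp hc).1 (by omega)
      omega
    rw [hlow, hstep]
    push_cast
    omega

theorem pvA_delay_fold_eq (L : List (Int × Int)) (T : Int)
    (hc : L.Pairwise (fun p q => p.2 ≤ q.1))
    (hb : ∀ p ∈ L, 0 ≤ p.1 ∧ p.1 < p.2 ∧ p.2 ≤ T) :
    L.foldl (fun acc p => if p.1 < min p.2 T then acc + (min p.2 T - p.1) else acc) 0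
      = (pvN L 0 T : Int) := by
  rw [pvA_delay_fold_eq_aux L T 0 hc hb]
  omega

-- ===== B side: the sweep counts covered points =====

theorem pvB_merge_count (L : List (Int × Int)) (T k c : Int)
    (hs : L.Pairwise (fun p q => p.1 ≤ q.1)) :
    (L.foldl (fun st p =>
      let lo := max p.1 st.2
      let hi := min p.2 T
      if lo < hi then (st.1 + (hi - lo), hi) else st) (k, c)).1 = k + (pvN L c T : Int) := by
  induction L generalizing k c with
  | nil => rw [pvN_nil]; simp [List.foldl_nil]
  | cons p rest ih =>
    have hstarts : ∀ q ∈ rest, p.1 ≤ q.1 := (List.pairwise_cons.mp hs).1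
    have hrest := (List.pairwise_cons.mp hs).2
    rw [List.foldl_cons]
    simp only
    by_cases hlt : max p.1 c < min p.2 T
    · rw [if_pos hlt, ih (k + (min p.2 T - max p.1 c)) (min p.2 T) hrest]
      rw [pvN_cons_step hlt hstarts]
      push_cast
      omega
    · rw [if_neg hlt, ih k c hrest]
      rw [pvN_cons_skip (by omega)]

-- ===== per-edge equality =====

theorem pv_per_edge (R S : List (Int × Int)) (T : Int) (hT : 0 < T)
    (hwR : ∀ p ∈ R, p.1 ≤ p.2) (hwS : ∀ p ∈ S, p.1 ≤ p.2) :
    (pvA_intersect (pvA_find_availability (PySem.List.sorted R (fun x => x.1) false) T)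
                   (pvA_find_availability (PySem.List.sorted S (fun x => x.1) false) T)).foldl
      (fun acc p => if p.1 < min p.2 T then acc + (min p.2 T - p.1) else acc) 0
    = T - (pvB_merge (PySem.List.sorted (R ++ S) (fun p => p.1) false) T).1 := by
  set SR := PySem.List.sorted R (fun x => x.1) false with hSR
  set SS := PySem.List.sorted S (fun x => x.1) false with hSS
  set L := PySem.List.sorted (R ++ S) (fun p => p.1) false with hL
  have hsR : SR.Pairwise (fun p q => p.1 ≤ q.1) := PySem.List.sorted_pairwise R _
  have hsS : SS.Pairwise (fun p q => p.1 ≤ q.1) := PySem.List.sorted_pairwise S _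
  have hsL : L.Pairwise (fun p q => p.1 ≤ q.1) := PySem.List.sorted_pairwise (R ++ S) _
  have hwR' : ∀ p ∈ SR, p.1 ≤ p.2 := fun p hp => hwR p ((PySem.List.mem_sorted _ _ _ _).mp hp)
  have hwS' : ∀ p ∈ SS, p.1 ≤ p.2 := fun p hp => hwS p ((PySem.List.mem_sorted _ _ _ _).mp hp)
  obtain ⟨cUp, cUm⟩ := pvA_availAux_canon SR 0 T hsR hwR'
  obtain ⟨cVp, cVm⟩ := pvA_availAux_canon SS 0 T hsS hwS'
  obtain ⟨cIp, cIm⟩ := pvA_intersect_canon _ _ cUp cVp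
  -- A's fold is the point count of the intersection
  show (pvA_intersect (pvA_availAux SR 0 T) (pvA_availAux SS 0 T)).foldl
      (fun acc p => if p.1 < min p.2 T then acc + (min p.2 T - p.1) else acc) 0
    = T - (pvB_merge L T).1
  have hAcount :
      (pvA_intersect (pvA_availAux SR 0 T) (pvA_availAux SS 0 T)).foldl
        (fun acc p => if p.1 < min p.2 T then acc + (min p.2 T - p.1) else acc) 0
      = (pvN (pvA_intersect (pvA_availAux SR 0 T) (pvA_availAux SS 0 T)) 0 T : Int) := by
    refine pvA_delay_fold_eq _ T cIp (fun p hp => ?_)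
    obtain ⟨h1, ⟨a, ha, ha1, ha2⟩, -⟩ := cIm p hp
    obtain ⟨ha0, -, haT⟩ := cUm a ha
    exact ⟨by omega, h1, by omega⟩
  -- B's sweep is the point count of the union
  have hBcount : (pvB_merge L T).1 = (pvN L 0 T : Int) := by
    have := pvB_merge_count L T 0 0 hsL
    rw [pvB_merge]
    simpa using this
  -- complement within [0, T)
  have hcompl : pvN (pvA_intersect (pvA_availAux SR 0 T) (pvA_availAux SS 0 T)) 0 T
      + pvN L 0 T = (T - 0).toNat := by
    refine pvN_compl (fun t h1 h2 => ?_)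
    have hcovL : pvCov L t = pvCov (SR ++ SS) t := by
      refine pvCov_eq_of_mem_iff (fun p => ?_) t
      rw [hL, PySem.List.mem_sorted, List.mem_append, List.mem_append,
        hSR, hSS, PySem.List.mem_sorted, PySem.List.mem_sorted]
    rw [pvA_intersect_cov _ _ t cUp cVp,
      pvA_availAux_cov SR 0 T t hsR, pvA_availAux_cov SS 0 T t hsS, hcovL]
    constructor
    · rintro ⟨⟨-, -, hu⟩, ⟨-, -, hv⟩⟩
      rw [← Bool.not_eq_true, pvCov_append]
      rintro (h | h)
      · rw [hu] at h; exact absurd h (by simp)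
      · rw [hv] at h; exact absurd h (by simp)
    · intro hno
      rw [← Bool.not_eq_true, pvCov_append] at hno
      push_neg at hno
      exact ⟨⟨h1, h2, by simpa using hno.1⟩, ⟨h1, h2, by simpa using hno.2⟩⟩
  rw [hAcount, hBcount]
  have : ((T - 0).toNat : Int) = T := by omega
  omega

-- ===== dict plumbing =====

theorem pv_get?_mk_map {f : List (Int × Int) → List (Int × Int)} (l : List (Int × List (Int × Int))) (n : Int) :
    (PySem.Dict.mk (l.map (fun kv => (kv.1, f kv.2)))).get? n = ((PySem.Dict.mk l).get? n).map f := by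
  induction l with
  | nil => rfl
  | cons kv l ih =>
    obtain ⟨k, v⟩ := kv
    rw [List.map_cons]
    rw [PySem.Dict.get?_mk_cons, PySem.Dict.get?_mk_cons]
    by_cases h : k == n
    · rw [if_pos h, if_pos h, Option.map_some]
    · rw [if_neg h, if_neg h, ih]

theorem pv_raw_eq (st : List (Int × Int)) (info : List (Int × Int × Int × Int)) :
    pvB_rawBusy st info = pvA_rawBusy st info := rfl

theorem pv_busy_rel (st : List (Int × Int)) (info : List (Int × Int × Int × Int)) (n : Int) :
    (pvA_nodeBusy st info).getD n [] = PySem.List.sorted ((pvB_rawBusy st info).getD n []) (fun x => x.1) false := by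
  rw [pv_raw_eq, pvA_nodeBusy]
  rw [PySem.Dict.getD_eq_get?_getD, PySem.Dict.getD_eq_get?_getD]
  rw [pv_get?_mk_map (f := fun v => PySem.List.sorted v (fun x => x.1) false)]
  cases h : (PySem.Dict.mk (pvA_rawBusy st info).items).get? n with
  | none =>
    simp only [Option.map_none, Option.getD_none]
    symm
    rw [PySem.List.sorted_eq_nil_iff]
  | some v =>
    simp only [Option.map_some, Option.getD_some]

theorem pv_raw_wf_aux (info : List (Int × Int × Int × Int)) (l : List (Int × Int))
    (d : PySem.Dict Int (List (Int × Int)))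
    (hl : (l.all (fun p =>
        match (PySem.Dict.mk info).get? p.1 with
        | some v => decide (0 ≤ v.2.2)
        | none => false)) = true)
    (hd : ∀ n, ∀ p ∈ d.getD n [], p.1 ≤ p.2) :
    ∀ n, ∀ p ∈ (l.foldl (fun busy p =>
      let v := (PySem.Dict.mk info).getD p.1 (0, 0, 0)
      let iv : Int × Int := (p.2, p.2 + v.2.2)
      let busy := busy.insert v.1 ((busy.getD v.1 []) ++ [iv])
      busy.insert v.2.1 ((busy.getD v.2.1 []) ++ [iv])) d).getD n [], p.1 ≤ p.2 := by
  induction l generalizing d with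
  | nil => exact hd
  | cons q l ih =>
    rw [List.all_cons, Bool.and_eq_true] at hl
    obtain ⟨hq, hl'⟩ := hl
    rw [List.foldl_cons]
    refine ih _ hl' ?_
    -- one step preserves well-formedness
    have hw : 0 ≤ ((PySem.Dict.mk info).getD q.1 (0, 0, 0)).2.2 := by
      cases h : (PySem.Dict.mk info).get? q.1 with
      | none => rw [h] at hq; exact absurd hq (by simp)
      | some v =>
        rw [h] at hq
        rw [PySem.Dict.getD_of_get?_eq_some _ _ h]
        simpa using hq
    simp only
    set v := (PySem.Dict.mk info).getD q.1 (0, 0, 0) with hv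
    set iv : Int × Int := (q.2, q.2 + v.2.2) with hiv
    have hivw : iv.1 ≤ iv.2 := by simp [hiv]; omega
    set d1 := d.insert v.1 ((d.getD v.1 []) ++ [iv]) with hd1
    have hwd1 : ∀ n, ∀ p ∈ d1.getD n [], p.1 ≤ p.2 := by
      intro n p hp
      rw [hd1, PySem.Dict.getD_insert] at hp
      split_ifs at hp with h
      · rw [List.mem_append] at hp
        rcases hp with hp | hp
        · exact hd _ p hp
        · simp only [List.mem_singleton] at hp; subst hp; exact hivw
      · exact hd _ p hp
    intro n p hp
    rw [PySem.Dict.getD_insert] at hp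
    split_ifs at hp with h
    · rw [List.mem_append] at hp
      rcases hp with hp | hp
      · exact hwd1 _ p hp
      · simp only [List.mem_singleton] at hp; subst hp; exact hivw
    · exact hwd1 _ p hp

theorem pv_raw_wf (st : List (Int × Int)) (info : List (Int × Int × Int × Int))
    (hpre : (st.all (fun p =>
        match (PySem.Dict.mk info).get? p.1 with
        | some v => decide (0 ≤ v.2.2)
        | none => false)) = true) :
    ∀ n, ∀ p ∈ (pvB_rawBusy st info).getD n [], p.1 ≤ p.2 := by
  rw [pv_raw_eq, pvA_rawBusy]
  exact pv_raw_wf_aux info st PySem.Dict.empty hpre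
    (fun n p hp => by rw [PySem.Dict.getD_empty] at hp; exact absurd hp List.not_mem_nil)

-- two foldl's with pointwise-equal step functions agree
theorem pv_foldl_fun_eq {α β : Type} {f g : α → β → α} (h : ∀ d e, f d e = g d e)
    (l : List β) (init : α) : l.foldl f init = l.foldl g init := by
  have : f = g := funext fun d => funext fun e => h d e
  rw [this]

-- ===== VERDICT (by name: the statement is the Claim_ definition above) =====
theorem calculate_demand_schedule_and_delay_spec : Claim_equal_calculate_demand_schedule_and_delay := by
  intro edges st info binomial hdom hpre
  unfold Spec_calculate_demand_schedule_and_delay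
  cases binomial with
  | true => rfl
  | false =>
    rcases hpre with hfalse | ⟨h1, h2⟩
    · exact absurd hfalse (by simp)
    · have hwRaw := pv_raw_wf st info h1
      have hstep : ∀ (d : PySem.Dict Int Int) (e : Int × Int × Int × Int),
          (let s_e := (PySem.Dict.mk st).getD e.1 0
           if s_e = 0 then d.insert e.1 0
           else
             let ua := pvA_find_availability ((pvA_nodeBusy st info).getD e.2.1 []) s_e
             let va := pvA_find_availability ((pvA_nodeBusy st info).getD e.2.2.1 []) s_e
             let ca := pvA_intersect ua va
             let delay := ca.foldl (fun acc p => if p.1 < min p.2 s_e then acc + (min p.2 s_e - p.1) else acc) 0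
             d.insert e.1 delay)
          = (let s_e := (PySem.Dict.mk st).getD e.1 0
             if s_e ≤ 0 then d.insert e.1 0
             else
               let ivs := PySem.List.sorted (((pvB_rawBusy st info).getD e.2.1 []) ++ ((pvB_rawBusy st info).getD e.2.2.1 [])) (fun p => p.1) false
               d.insert e.1 (s_e - (pvB_merge ivs s_e).1)) := by
        intro d e
        simp only
        set T := (PySem.Dict.mk st).getD e.1 0 with hT
        rcases lt_trichotomy T 0 with hneg | hzero | hpos
        · rw [if_neg (by omega), if_pos (by omega)]
          have hua : pvA_find_availability ((pvA_nodeBusy st info).getD e.2.1 []) T = [] := by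
            rw [pv_busy_rel, pvA_find_availability]
            refine List.eq_nil_iff_forall_not_mem.mpr (fun p hp => ?_)
            have hc := (pvA_availAux_canon _ 0 T (PySem.List.sorted_pairwise _ _)
              (fun q hq => hwRaw _ q ((PySem.List.mem_sorted _ _ _ _).mp hq))).2 p hp
            omega
          rw [hua, pvA_intersect_nil_left]
          rfl
        · rw [if_pos hzero, if_pos (by omega)]
        · rw [if_neg (by omega), if_neg (by omega)]
          rw [pv_busy_rel, pv_busy_rel]
          congr 1
          exact pv_per_edge _ _ T hpos (hwRaw _) (hwRaw _)
      have hdict : pvA_delays edges st info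
          = edges.foldl (fun d e =>
              let s_e := (PySem.Dict.mk st).getD e.1 0
              if s_e ≤ 0 then d.insert e.1 0
              else
                let ivs := PySem.List.sorted (((pvB_rawBusy st info).getD e.2.1 []) ++ ((pvB_rawBusy st info).getD e.2.2.1 [])) (fun p => p.1) false
                d.insert e.1 (s_e - (pvB_merge ivs s_e).1)) PySem.Dict.empty := by
        simp only [pvA_delays]
        exact pv_foldl_fun_eq hstep edges PySem.Dict.empty
      simp only [calculate_demand_schedule_and_delay, calculate_demand_schedule_and_delay_alt,
        Bool.false_eq_true, if_false, hdict]
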